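-- pv_equiv track=rewrite | github.com/lancescut/knowledge_base1 | backend/services/pdf_service.py | _detect_heading_level
-- ===== SOURCE A (Python) =====
-- def _detect_heading_level(title: str) -> int:
--     """Detect heading level based on content and format."""
--     title_lower = title.lower().strip()
--
--     # Level 1: Major sections
--     if any(keyword in title_lower for keyword in ['introduction', 'overview', 'getting started', 'conclusion']):
--         return 1
--
--     # Level 2: Main topics
--     if any(keyword in title_lower for keyword in ['api', 'configuration', 'installation', 'examples']):
--         return 2
--
--     # Level 3: Subtopics
--     if any(keyword in title_lower for keyword in ['method', 'function', 'parameter', 'example']):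
--         return 3
--
--     # Default level
--     return 2
-- ===== SOURCE B (Python) =====
-- _KEYWORD_LEVELS = {
--     'introduction': 1, 'overview': 1, 'getting started': 1, 'conclusion': 1,
--     'api': 2, 'configuration': 2, 'installation': 2, 'examples': 2,
--     'method': 3, 'function': 3, 'parameter': 3, 'example': 3,
-- }
--
--
-- def _detect_heading_level(title: str) -> int:
--     t = title.lower().strip()
--     matched = [level for keyword, level in _KEYWORD_LEVELS.items() if keyword in t]
--     return min(matched) if matched else 2
-- ===== Notes on version B (the rewrite author's own statement) =====
-- stated objective: simpler
-- what changed: Replaces the three ordered any()-branch checks with one keyword-to-level table: B collects the levels of all keywords occurring in the title and returns their minimum (default 2), instead of short-circuiting through ordered branches.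
import Mathlib
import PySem

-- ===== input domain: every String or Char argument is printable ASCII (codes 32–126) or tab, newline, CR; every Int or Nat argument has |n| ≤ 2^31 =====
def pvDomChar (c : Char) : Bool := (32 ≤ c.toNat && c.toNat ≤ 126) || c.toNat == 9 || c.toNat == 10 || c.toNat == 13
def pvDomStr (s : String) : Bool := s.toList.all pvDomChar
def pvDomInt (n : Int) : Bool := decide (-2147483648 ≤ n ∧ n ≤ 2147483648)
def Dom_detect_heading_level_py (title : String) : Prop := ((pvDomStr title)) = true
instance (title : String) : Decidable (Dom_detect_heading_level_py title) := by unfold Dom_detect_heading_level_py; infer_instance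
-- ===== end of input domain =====

-- B replaces A's three ordered any()-branches with one keyword→level table aggregated by minimum of all matches (objective: simpler).


-- ===== PORT A =====
def detect_heading_level_py (title : String) : Int :=
  let title_lower := PySem.Str.strip (PySem.Str.lower title)
  if ["introduction", "overview", "getting started", "conclusion"].any
      (fun keyword => PySem.Str.isIn keyword title_lower) then 1
  else if ["api", "configuration", "installation", "examples"].any
      (fun keyword => PySem.Str.isIn keyword title_lower) then 2
  else if ["method", "function", "parameter", "example"].any
      (fun keyword => PySem.Str.isIn keyword title_lower) then 3
  else 2

-- ===== PORT B =====
-- the _KEYWORD_LEVELS dict of Source B (a literal dict with distinct keys, used only for iteration, as an assoc list)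
def pvKeywordLevels : List (String × Int) :=
  [("introduction", 1), ("overview", 1), ("getting started", 1), ("conclusion", 1),
   ("api", 2), ("configuration", 2), ("installation", 2), ("examples", 2),
   ("method", 3), ("function", 3), ("parameter", 3), ("example", 3)]

def detect_heading_level_py_alt (title : String) : Int :=
  let t := PySem.Str.strip (PySem.Str.lower title)
  let matched := (pvKeywordLevels.filter (fun p => PySem.Str.isIn p.1 t)).map Prod.snd
  match matched.min? with
  | some m => m
  | none => 2

-- ===== PRECONDITION & SPEC =====
def Spec_detect_heading_level_py (title : String) (out : Int) : Prop := out = detect_heading_level_py_alt title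
instance (title : String) (out : Int) : Decidable (Spec_detect_heading_level_py title out) := by unfold Spec_detect_heading_level_py; infer_instance

-- ===== CLAIM (what is proved, stated in full; the proofs are below) =====
def Claim_equal_detect_heading_level_py : Prop := ∀ (title : String), Dom_detect_heading_level_py title → Spec_detect_heading_level_py title (detect_heading_level_py title)

-- ===== LEMMAS AND PROOFS =====

theorem pv_min?_cons_of_le (v : Int) (xs : List Int) (h : ∀ x ∈ xs, v ≤ x) :
    (v :: xs).min? = some v := by
  rw [List.min?_cons']
  congr 1
  induction xs generalizing v with
  | nil => rfl
  | cons a xs ih =>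
    simp only [List.foldl_cons]
    rw [min_eq_left (h a (by simp))]
    exact ih v (fun x hx => h x (by simp [hx]))

-- min of the matched levels of a pair list whose levels are non-decreasing = level of the first match
theorem pv_min?_filter_mono (f : String → Bool) (l : List (String × Int))
    (hp : l.Pairwise (fun a b => a.2 ≤ b.2)) :
    ((l.filter (fun p => f p.1)).map Prod.snd).min? =
      (l.find? (fun p => f p.1)).map Prod.snd := by
  induction l with
  | nil => rfl
  | cons kv rest ih =>
    rw [List.pairwise_cons] at hp
    by_cases hf : f kv.1 = true
    · rw [List.filter_cons_of_pos (p := fun (q : String × Int) => f q.1) (by simpa using hf),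
        List.find?_cons_of_pos (p := fun (q : String × Int) => f q.1) (by simpa using hf), List.map_cons]
      exact pv_min?_cons_of_le _ _ (by
        intro x hx
        simp only [List.mem_map, List.mem_filter] at hx
        obtain ⟨p, ⟨hpmem, _⟩, rfl⟩ := hx
        exact hp.1 p hpmem)
    · rw [List.filter_cons_of_neg (p := fun (q : String × Int) => f q.1) (by simpa using hf),
        List.find?_cons_of_neg (p := fun (q : String × Int) => f q.1) (by simpa using hf)]
      exact ih hp.2

-- ===== VERDICT (by name: the statement is the Claim_ definition above) =====
theorem detect_heading_level_py_spec : Claim_equal_detect_heading_level_py := by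
  intro title _
  simp only [Spec_detect_heading_level_py, detect_heading_level_py, detect_heading_level_py_alt]
  generalize PySem.Str.strip (PySem.Str.lower title) = t
  rw [pv_min?_filter_mono (fun s => PySem.Str.isIn s t) pvKeywordLevels (by decide)]
  by_cases h1 : PySem.Str.isIn "introduction" t = true
  · simp_all [pvKeywordLevels]
  by_cases h2 : PySem.Str.isIn "overview" t = true
  · simp_all [pvKeywordLevels, List.find?]
  by_cases h3 : PySem.Str.isIn "getting started" t = true
  · simp_all [pvKeywordLevels, List.find?]
  by_cases h4 : PySem.Str.isIn "conclusion" t = true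
  · simp_all [pvKeywordLevels, List.find?]
  by_cases h5 : PySem.Str.isIn "api" t = true
  · simp_all [pvKeywordLevels, List.find?]
  by_cases h6 : PySem.Str.isIn "configuration" t = true
  · simp_all [pvKeywordLevels, List.find?]
  by_cases h7 : PySem.Str.isIn "installation" t = true
  · simp_all [pvKeywordLevels, List.find?]
  by_cases h8 : PySem.Str.isIn "examples" t = true
  · simp_all [pvKeywordLevels, List.find?]
  by_cases h9 : PySem.Str.isIn "method" t = true
  · simp_all [pvKeywordLevels, List.find?]
  by_cases h10 : PySem.Str.isIn "function" t = true
  · simp_all [pvKeywordLevels, List.find?]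
  by_cases h11 : PySem.Str.isIn "parameter" t = true
  · simp_all [pvKeywordLevels, List.find?]
  by_cases h12 : PySem.Str.isIn "example" t = true
  · simp_all [pvKeywordLevels, List.find?]
  · simp_all [pvKeywordLevels, List.find?]
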